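-- pv_equiv track=rewrite | github.com/gverebl6/work_time_tracker | workHours/commands.py | _get_short_uuid
-- ===== SOURCE A (Python) =====
-- def _get_short_uuid(option, uuids):
--     """Returns the shortes possible uuid when more than one is possible"""
--     top_len = 0
--     for elems in zip(*uuids):
--         if len(set(elems)) > 1:
--             return uuids[option][:top_len+1]
--         else:
--             top_len += 1
--     return uuids[option]
-- ===== SOURCE B (Python) =====
-- def _get_short_uuid(option, uuids):
--     selected = uuids[option]
--     prefix = uuids[0]
--     for u in uuids[1:]:
--         n = 0
--         while n < len(prefix) and n < len(u) and prefix[n] == u[n]: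
--             n += 1
--         prefix = prefix[:n]
--     if prefix in uuids:
--         return selected
--     return selected[:len(prefix) + 1]
-- ===== Notes on version B (the rewrite author's own statement) =====
-- stated objective: alternative
-- what changed: Instead of scanning transposed columns with a set per position, B folds a pairwise longest-common-prefix over the list and returns the full uuid exactly when that prefix is itself one of the uuids, else the prefix extended by one character.
import Mathlib
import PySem

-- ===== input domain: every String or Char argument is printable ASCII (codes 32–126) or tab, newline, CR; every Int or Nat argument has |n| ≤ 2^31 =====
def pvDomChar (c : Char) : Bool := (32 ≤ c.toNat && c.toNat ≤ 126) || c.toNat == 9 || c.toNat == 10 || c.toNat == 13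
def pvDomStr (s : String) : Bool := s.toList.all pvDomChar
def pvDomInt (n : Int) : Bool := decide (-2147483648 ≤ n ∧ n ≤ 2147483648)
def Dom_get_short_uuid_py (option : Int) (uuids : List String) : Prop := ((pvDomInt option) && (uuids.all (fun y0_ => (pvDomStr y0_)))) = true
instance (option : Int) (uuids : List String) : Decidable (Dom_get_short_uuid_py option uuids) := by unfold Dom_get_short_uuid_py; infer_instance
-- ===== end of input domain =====

-- B replaces A's column-by-column set scan by folding a pairwise common prefix over the
-- list and testing whether that prefix is itself one of the uuids (objective: alternative).

-- ===== PORT A =====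
-- zip(*uuids): columns of the uuids, truncated to the shortest length
def pvZipStar (uuids : List String) : List (List Char) :=
  let ls := uuids.map String.toList
  let mn := match ls.map List.length with
            | [] => 0
            | x :: xs => xs.foldl min x
  (List.range mn).map (fun i => ls.map (fun l => l.getD i ' '))  -- i < mn ≤ each length: the ' ' default is unreachable

def pvLoopA (option : Int) (uuids : List String) (cols : List (List Char)) (top_len : Nat) : String :=
  match cols with
  | [] => (PySem.List.pyGet? uuids option).getD ""            -- uuids[option]; getD unreachable under Pre_
  | elems :: rest =>
    if 1 < PySem.Set.len (PySem.Set.ofList elems) then        -- len(set(elems)) > 1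
      PySem.Str.slice ((PySem.List.pyGet? uuids option).getD "") none (some ((top_len : Int) + 1))
    else pvLoopA option uuids rest (top_len + 1)

def get_short_uuid_py (option : Int) (uuids : List String) : String :=
  pvLoopA option uuids (pvZipStar uuids) 0

-- ===== PORT B =====
-- the inner while loop of Source B: longest common prefix of two char lists
def pvCp (a b : List Char) : List Char :=
  match a, b with
  | x :: xs, y :: ys => if x = y then x :: pvCp xs ys else []
  | _, _ => []

def get_short_uuid_py_alt (option : Int) (uuids : List String) : String :=
  let sel := (PySem.List.pyGet? uuids option).getD ""         -- selected = uuids[option]; getD unreachable under Pre_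
  match uuids with
  | [] => ""                                                  -- unreachable: Source B raises at uuids[option] (outside Pre_)
  | h :: t =>
    let p := t.foldl (fun acc u => pvCp acc u.toList) h.toList  -- prefix loop over uuids[1:]
    if (h :: t).any (fun u => u.toList == p) then sel           -- prefix in uuids
    else PySem.Str.slice sel none (some ((p.length : Int) + 1)) -- selected[:len(prefix)+1]

-- ===== PRECONDITION & SPEC =====
-- A raises IndexError at uuids[option] whenever option is not a valid (possibly negative) index; exactly those inputs are excluded.
def Pre_get_short_uuid_py (option : Int) (uuids : List String) : Prop :=
  PySem.Raise.InRange uuids.length option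
instance (option : Int) (uuids : List String) : Decidable (Pre_get_short_uuid_py option uuids) := by
  unfold Pre_get_short_uuid_py; infer_instance

def pvWitness_get_short_uuid_py : Int × List String := (0, ["ab", "ac"])

def Spec_get_short_uuid_py (option : Int) (uuids : List String) (out : String) : Prop := out = get_short_uuid_py_alt option uuids
instance (option : Int) (uuids : List String) (out : String) : Decidable (Spec_get_short_uuid_py option uuids out) := by unfold Spec_get_short_uuid_py; infer_instance

-- ===== CLAIM (what is proved, stated in full; the proofs are below) =====
def Claim_equal_get_short_uuid_py : Prop := ∀ (option : Int) (uuids : List String), Dom_get_short_uuid_py option uuids → Pre_get_short_uuid_py option uuids → Spec_get_short_uuid_py option uuids (get_short_uuid_py option uuids)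

-- ===== LEMMAS AND PROOFS =====

theorem pvCp_prefix_left : ∀ a b : List Char, pvCp a b <+: a := by
  intro a
  induction a with
  | nil => intro b; simp [pvCp]
  | cons x xs ih =>
    intro b
    cases b with
    | nil => simp [pvCp]
    | cons y ys =>
      by_cases h : x = y
      · simp only [pvCp, if_pos h]
        obtain ⟨r, hr⟩ := ih ys
        exact ⟨r, by simp [hr]⟩
      · simp [pvCp, h]

theorem pvCp_prefix_right : ∀ a b : List Char, pvCp a b <+: b := by
  intro a
  induction a with
  | nil => intro b; simp [pvCp]
  | cons x xs ih =>
    intro b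
    cases b with
    | nil => simp [pvCp]
    | cons y ys =>
      by_cases h : x = y
      · simp only [pvCp, if_pos h]
        obtain ⟨r, hr⟩ := ih ys
        exact ⟨r, by simp [hr, h]⟩
      · simp [pvCp, h]

theorem prefix_pvCp : ∀ (c a b : List Char), c <+: a → c <+: b → c <+: pvCp a b := by
  intro c
  induction c with
  | nil => intro a b _ _; exact List.nil_prefix
  | cons z zs ih =>
    intro a b ha hb
    obtain ⟨r, rfl⟩ := ha
    obtain ⟨s, rfl⟩ := hb
    simp only [List.cons_append, pvCp]
    obtain ⟨w, hw⟩ := ih (zs ++ r) (zs ++ s) ⟨r, rfl⟩ ⟨s, rfl⟩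
    exact ⟨w, by simp [hw]⟩

theorem foldCp_prefix_acc : ∀ (ts : List String) (acc : List Char),
    ts.foldl (fun a u => pvCp a u.toList) acc <+: acc := by
  intro ts
  induction ts with
  | nil => intro acc; exact List.prefix_refl _
  | cons u us ih =>
    intro acc
    exact (ih (pvCp acc u.toList)).trans (pvCp_prefix_left _ _)

theorem foldCp_prefix_mem : ∀ (ts : List String) (acc : List Char) (u : String), u ∈ ts →
    ts.foldl (fun a u => pvCp a u.toList) acc <+: u.toList := by
  intro ts
  induction ts with
  | nil => intro acc u hu; simp at hu
  | cons v vs ih =>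
    intro acc u hu
    rcases List.mem_cons.mp hu with rfl | hu
    · exact (foldCp_prefix_acc vs _).trans (pvCp_prefix_right _ _)
    · exact ih _ u hu

theorem prefix_foldCp : ∀ (ts : List String) (acc c : List Char), c <+: acc →
    (∀ u ∈ ts, c <+: u.toList) → c <+: ts.foldl (fun a u => pvCp a u.toList) acc := by
  intro ts
  induction ts with
  | nil => intro acc c hc _; exact hc
  | cons v vs ih =>
    intro acc c hc hall
    exact ih _ _ (prefix_pvCp _ _ _ hc (hall v (by simp))) (fun u hu => hall u (by simp [hu]))

theorem setlen_le_one_iff (c : List Char) :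
    PySem.Set.len (PySem.Set.ofList c) ≤ 1 ↔ ∀ x ∈ c, ∀ y ∈ c, x = y := by
  have hmem : ∀ x, x ∈ PySem.Set.ofList c ↔ x ∈ c := fun x => PySem.Set.mem_ofList c x
  have hnd := PySem.Set.nodup_ofList c
  have hlen : PySem.Set.len (PySem.Set.ofList c) = (PySem.Set.ofList c).length := rfl
  rw [hlen]
  generalize hs : PySem.Set.ofList c = s at hmem hnd
  constructor
  · intro hle x hx y hy
    have hx' : x ∈ s := (hmem x).mpr hx
    have hy' : y ∈ s := (hmem y).mpr hy
    cases s with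
    | nil => simp at hx'
    | cons a s' =>
      cases s' with
      | nil =>
        simp at hx' hy'
        rw [hx', hy']
      | cons b s'' => simp at hle; omega
  · intro hall
    cases s with
    | nil => simp
    | cons a s' =>
      cases s' with
      | nil => simp
      | cons b s'' =>
        exfalso
        have ha : a ∈ c := (hmem a).mp (by simp)
        have hb : b ∈ c := (hmem b).mp (by simp)
        have hab : a ≠ b := by simp at hnd; tauto
        exact hab (hall a ha b hb)

theorem pvLoopA_skip (o : Int) (uu : List String) : ∀ (cs1 rest : List (List Char)) (tl : Nat),
    (∀ c ∈ cs1, ¬ 1 < PySem.Set.len (PySem.Set.ofList c)) →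
    pvLoopA o uu (cs1 ++ rest) tl = pvLoopA o uu rest (tl + cs1.length) := by
  intro cs1
  induction cs1 with
  | nil => intro rest tl _; simp
  | cons c cs ih =>
    intro rest tl hall
    have hc := hall c (by simp)
    simp only [List.cons_append, pvLoopA, if_neg hc]
    rw [ih rest (tl + 1) (fun d hd => hall d (by simp [hd]))]
    congr 1
    simp
    omega

theorem get_short_uuid_cons (option : Int) (h : String) (t : List String) :
    get_short_uuid_py option (h :: t) = get_short_uuid_py_alt option (h :: t) := by
  -- L = the folded common prefix, M = the minimal uuid length
  have hL : ∀ l ∈ (h :: t).map String.toList,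
      t.foldl (fun a u => pvCp a u.toList) h.toList <+: l := by
    intro l hl
    rcases List.mem_map.mp hl with ⟨u, hu, rfl⟩
    rcases List.mem_cons.mp hu with rfl | hu
    · exact foldCp_prefix_acc t _
    · exact foldCp_prefix_mem t _ u hu
  set L : List Char := t.foldl (fun a u => pvCp a u.toList) h.toList with hLdef
  set M : Nat := ((t.map String.toList).map List.length).foldl min h.toList.length with hMdef
  have hMle : ∀ l ∈ (h :: t).map String.toList, M ≤ l.length := by
    intro l hl
    rcases List.mem_map.mp hl with ⟨u, hu, rfl⟩
    rcases List.mem_cons.mp hu with rfl | hu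
    · exact (PySem.List.foldl_min_le _ _).1
    · exact (PySem.List.foldl_min_le _ _).2 u.toList.length
        (List.mem_map.mpr ⟨u.toList, List.mem_map.mpr ⟨u, hu, rfl⟩, rfl⟩)
  have hkM : L.length ≤ M := by
    have hgen : ∀ (l : List Nat) (a : Nat), L.length ≤ a → (∀ y ∈ l, L.length ≤ y) →
        L.length ≤ l.foldl min a := by
      intro l
      induction l with
      | nil => intro a ha _; exact ha
      | cons y ys ih =>
        intro a ha hall
        exact ih _ (le_min ha (hall y (by simp))) (fun z hz => hall z (by simp [hz]))
    refine hgen _ _ ((hL h.toList (by simp)).length_le) ?_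
    intro y hy
    rcases List.mem_map.mp hy with ⟨l, hl, rfl⟩
    rcases List.mem_map.mp hl with ⟨u, hu, rfl⟩
    exact (hL u.toList (List.mem_map.mpr ⟨u, by simp [hu], rfl⟩)).length_le
  have hMex : ∃ l ∈ (h :: t).map String.toList, l.length = M := by
    rcases PySem.List.foldl_min_mem ((t.map String.toList).map List.length) h.toList.length
      with hc | hc
    · exact ⟨h.toList, by simp, hc.symm ▸ rfl⟩
    · rcases List.mem_map.mp hc with ⟨l, hl, hlen⟩
      rcases List.mem_map.mp hl with ⟨u, hu, rfl⟩
      exact ⟨u.toList, List.mem_map.mpr ⟨u, by simp [hu], rfl⟩, hlen⟩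
  have hcols : pvZipStar (h :: t) =
      (List.range M).map (fun i => ((h :: t).map String.toList).map (fun l => l.getD i ' ')) := rfl
  -- a column strictly before position L.length is constant
  have hconstlt : ∀ j, j < L.length →
      ∀ x ∈ ((h :: t).map String.toList).map (fun l => l.getD j ' '),
      ∀ y ∈ ((h :: t).map String.toList).map (fun l => l.getD j ' '), x = y := by
    have hval : ∀ j (hj : j < L.length), ∀ l ∈ (h :: t).map String.toList,
        l.getD j ' ' = L[j]'hj := by
      intro j hj l hl
      obtain ⟨r, hr⟩ := hL l hl
      have hjl : j < l.length := by
        have := (hL l hl).length_le; omega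
      subst hr
      rw [List.getD_eq_getElem _ ' ' hjl, List.getElem_append_left hj]
    intro j hj x hx y hy
    rcases List.mem_map.mp hx with ⟨l, hl, rfl⟩
    rcases List.mem_map.mp hy with ⟨l', hl', rfl⟩
    rw [hval j hj l hl, hval j hj l' hl']
  by_cases hany : ((h :: t).any fun u => u.toList == L) = true
  · -- the common prefix is one of the uuids: both sides return uuids[option] in full
    have hBeq : get_short_uuid_py_alt option (h :: t) =
        (PySem.List.pyGet? (h :: t) option).getD "" := by
      simp only [get_short_uuid_py_alt]
      rw [← hLdef, hany]
      simp
    rcases List.any_eq_true.mp hany with ⟨u, hu, hu2⟩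
    have huL : u.toList = L := eq_of_beq hu2
    have hkMeq : L.length = M :=
      le_antisymm hkM (huL ▸ hMle u.toList (List.mem_map.mpr ⟨u, hu, rfl⟩))
    have hall : ∀ c ∈ pvZipStar (h :: t), ¬ 1 < PySem.Set.len (PySem.Set.ofList c) := by
      intro c hc
      rw [hcols] at hc
      rcases List.mem_map.mp hc with ⟨j, hj, rfl⟩
      have hjM : j < M := List.mem_range.mp hj
      have hle1 := (setlen_le_one_iff (((h :: t).map String.toList).map (fun l => l.getD j ' '))).mpr
        (hconstlt j (by rw [hkMeq]; exact hjM))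
      omega
    show pvLoopA option (h :: t) (pvZipStar (h :: t)) 0 = _
    rw [hBeq, ← List.append_nil (pvZipStar (h :: t)),
      pvLoopA_skip option (h :: t) _ [] 0 hall]
    rfl
  · -- real divergence: both sides return uuids[option][:L.length+1]
    have hanyf : ((h :: t).any fun u => u.toList == L) = false := Bool.eq_false_iff.mpr hany
    have hne : ∀ u ∈ h :: t, u.toList ≠ L := by
      intro u hu hEq
      have : ((h :: t).any fun v => v.toList == L) = true :=
        List.any_eq_true.mpr ⟨u, hu, beq_iff_eq.mpr hEq⟩
      exact hany this
    have hkMlt : L.length < M := by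
      rcases hMex with ⟨l, hl, hlen⟩
      rcases lt_or_eq_of_le hkM with hlt | heq
      · exact hlt
      · exfalso
        have hLeq : L = l := (hL l hl).eq_of_length (by omega)
        rcases List.mem_map.mp hl with ⟨u, hu, rfl⟩
        exact hne u hu hLeq.symm
    -- the column at position L.length is not constant
    have hnc : 1 < PySem.Set.len (PySem.Set.ofList
        (((h :: t).map String.toList).map (fun l => l.getD L.length ' '))) := by
      by_contra hle
      have hconst := (setlen_le_one_iff
        (((h :: t).map String.toList).map (fun l => l.getD L.length ' '))).mp (by omega)
      have hq : ∀ l ∈ (h :: t).map String.toList,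
          L ++ [h.toList.getD L.length ' '] <+: l := by
        intro l hl
        obtain ⟨r, hr⟩ := hL l hl
        have hlenl : L.length < l.length := lt_of_lt_of_le hkMlt (hMle l hl)
        subst hr
        cases r with
        | nil => simp at hlenl
        | cons a r' =>
          have ha : (L ++ a :: r').getD L.length ' ' = a := by
            rw [List.getD_eq_getElem _ ' ' hlenl,
              List.getElem_append_right (le_refl L.length)]
            simp
          have hac : a = h.toList.getD L.length ' ' := by
            rw [← ha]
            exact hconst _ (List.mem_map.mpr ⟨L ++ a :: r', hl, rfl⟩)
              _ (List.mem_map.mpr ⟨h.toList, by simp, rfl⟩)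
          refine ⟨r', ?_⟩
          rw [← hac]
          simp
      have hqL : L ++ [h.toList.getD L.length ' '] <+: L :=
        prefix_foldCp t h.toList _ (hq h.toList (by simp))
          (fun u hu => hq u.toList (List.mem_map.mpr ⟨u, by simp [hu], rfl⟩))
      have hcontra := hqL.length_le
      simp at hcontra
    have hBeq : get_short_uuid_py_alt option (h :: t) =
        PySem.Str.slice ((PySem.List.pyGet? (h :: t) option).getD "") none
          (some ((L.length : Int) + 1)) := by
      simp only [get_short_uuid_py_alt]
      rw [← hLdef, hanyf]
      simp
    -- split the columns at position L.length
    show pvLoopA option (h :: t) (pvZipStar (h :: t)) 0 = _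
    rw [hBeq, hcols]
    set C : List (List Char) :=
      (List.range M).map (fun i => ((h :: t).map String.toList).map (fun l => l.getD i ' '))
      with hC
    have hClen : C.length = M := by simp [hC]
    have hkc : L.length < C.length := by omega
    have hCget : ∀ (i : Nat) (hi : i < C.length),
        C[i] = ((h :: t).map String.toList).map (fun l => l.getD i ' ') := by
      intro i hi
      simp [hC]
    have hsplit : C = C.take L.length ++ (C[L.length]'hkc :: C.drop (L.length + 1)) := by
      rw [List.getElem_cons_drop hkc, List.take_append_drop]
    have htake_all : ∀ c ∈ C.take L.length, ¬ 1 < PySem.Set.len (PySem.Set.ofList c) := by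
      intro c hc
      rcases List.mem_iff_getElem.mp hc with ⟨i, hi, rfl⟩
      have hik : i < L.length := by
        have := List.length_take_le L.length C; omega
      rw [List.getElem_take, hCget i (by omega)]
      have hle1 := (setlen_le_one_iff
        (((h :: t).map String.toList).map (fun l => l.getD i ' '))).mpr (hconstlt i hik)
      omega
    have htklen : (C.take L.length).length = L.length := by
      simp
      omega
    conv_lhs => rw [hsplit]
    rw [pvLoopA_skip option (h :: t) _ _ 0 htake_all, htklen]
    simp only [pvLoopA, hCget L.length hkc, if_pos hnc]
    norm_num

-- ===== VERDICT (by name: the statement is the Claim_ definition above) =====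
theorem get_short_uuid_py_spec : Claim_equal_get_short_uuid_py := by
  intro option uuids hdom hpre
  unfold Spec_get_short_uuid_py
  cases uuids with
  | nil =>
    exfalso
    simp only [Pre_get_short_uuid_py, PySem.Raise.InRange] at hpre
    simp at hpre
    omega
  | cons h t => exact get_short_uuid_cons option h t
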